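-- pv_equiv track=rewrite | github.com/lgrangeia/tomtom-hacking | hash-scripts/hash_ciphertext.py | xormask_blob
-- ===== SOURCE A (Python) =====
-- def xormask_blob(data):
--     i = 0
--     blocksz = 16
--     output = []
--     extra = 0x7C
--     while i < len(data):
--         output.append(chr(ord(data[i])^extra) + data[i+1:i+blocksz])
--         extra += 0x4
--         extra &= 0x7f
--         i += blocksz
--
--     return''.join(output)
-- ===== SOURCE B (Python) =====
-- def xormask_blob(data):
--     # Keystream approach: build a per-character key (the rotating mask at each
--     # 16-byte block start, 0 elsewhere), then XOR the whole string character-wise.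
--     key = [((0x7C + 4 * (i // 16)) & 0x7f) if i % 16 == 0 else 0
--            for i in range(len(data))]
--     return ''.join(chr(ord(c) ^ m) for c, m in zip(data, key))
-- ===== Notes on version B (the rewrite author's own statement) =====
-- stated objective: alternative
-- what changed: B replaces A's while-loop that slices the data into 16-byte blocks while threading a rotating-mask accumulator by a keystream construction: it first builds a per-character key list (the mask at each block start, 0 elsewhere) and then XORs the whole string character-wise with zip, with no block slicing and no loop-carried state.
import Mathlib
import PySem

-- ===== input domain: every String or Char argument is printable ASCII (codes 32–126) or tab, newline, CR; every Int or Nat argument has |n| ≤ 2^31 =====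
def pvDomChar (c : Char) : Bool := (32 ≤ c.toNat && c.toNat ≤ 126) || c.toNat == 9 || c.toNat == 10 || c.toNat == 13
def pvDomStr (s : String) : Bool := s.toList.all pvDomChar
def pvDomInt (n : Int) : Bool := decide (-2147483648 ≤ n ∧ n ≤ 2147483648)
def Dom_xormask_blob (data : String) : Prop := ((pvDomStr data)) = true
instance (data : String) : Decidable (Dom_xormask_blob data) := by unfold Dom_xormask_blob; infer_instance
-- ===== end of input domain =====

-- B replaces A's block-slicing loop with a keystream: a per-character key list built once
-- (rotating mask at block starts, 0 elsewhere) XORed character-wise — objective: alternative.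
-- Equal return value on all inputs.

-- ===== PORT A =====
-- A's while loop with its state (index i, rotating mask `extra`, accumulated `output`);
-- the recursion returns the accumulated list of blocks, joined at the end.
def xormaskLoop (l : List Char) (i : Nat) (extra : Nat) : List (List Char) :=
  if h : i < l.length then
    (Char.ofNat ((l.getD i ' ').toNat ^^^ extra)
        :: PySem.List.slice l (some ((i + 1 : Nat) : Int)) (some ((i + 16 : Nat) : Int)))
      :: xormaskLoop l (i + 16) ((extra + 4) &&& 127)
  else []
termination_by l.length - i
decreasing_by omega

def xormask_blob (data : String) : String :=
  String.ofList (xormaskLoop data.toList 0 124).flatten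

-- ===== PORT B =====
-- Source B's keystream: key[i] = rotating mask if i is a block start, else 0
def pvKey (n : Nat) : List Nat :=
  (List.range n).map (fun i => if i % 16 = 0 then (124 + 4 * (i / 16)) &&& 127 else 0)

-- ''.join(chr(ord(c) ^ m) for c, m in zip(data, key))
def xormask_blob_alt (data : String) : String :=
  String.ofList ((data.toList.zip (pvKey data.toList.length)).map
    (fun p => Char.ofNat (p.1.toNat ^^^ p.2)))

-- ===== PRECONDITION & SPEC =====
def Spec_xormask_blob (data : String) (out : String) : Prop := out = xormask_blob_alt data
instance (data : String) (out : String) : Decidable (Spec_xormask_blob data out) := by unfold Spec_xormask_blob; infer_instance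

-- ===== CLAIM (what is proved, stated in full; the proofs are below) =====
def Claim_equal_xormask_blob : Prop := ∀ (data : String), Dom_xormask_blob data → Spec_xormask_blob data (xormask_blob data)

-- ===== LEMMAS AND PROOFS =====

-- the keystream at a global character index
def pvG (i : Nat) : Nat := if i % 16 = 0 then (124 + 4 * (i / 16)) &&& 127 else 0

def pvF (p : Char × Nat) : Char := Char.ofNat (p.1.toNat ^^^ pvG p.2)

theorem pvAlt_eq (data : String) :
    xormask_blob_alt data = String.ofList ((data.toList.zipIdx 0).map pvF) := by
  unfold xormask_blob_alt pvKey
  rw [List.zip_map_right, List.map_map, List.range_eq_range',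
      ← List.zipIdx_eq_zip_range']
  rfl

-- characters whose keystream entry is 0 pass through unchanged
theorem pvMap_zero (xs : List Char) : ∀ (n : Nat), (∀ j, j < xs.length → (n + j) % 16 ≠ 0) →
    (xs.zipIdx n).map pvF = xs := by
  induction xs with
  | nil => intro n _; rfl
  | cons c t ih =>
      intro n h
      rw [List.zipIdx_cons, List.map_cons, ih (n + 1) (by intro j hj; have := h (1 + j) (by simp; omega); omega)]
      have h0 : n % 16 ≠ 0 := by have := h 0 (by simp); omega
      simp [pvF, pvG, h0, Char.ofNat_toNat]

theorem pvMask_step (k : Nat) :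
    ((124 + 4 * k) % 128 + 4) &&& 127 = (124 + 4 * (k + 1)) % 128 := by
  rw [Nat.and_two_pow_sub_one_eq_mod ((124 + 4 * k) % 128 + 4) 7]
  omega

theorem pvLoopFlat (l : List Char) :
    ∀ (j k : Nat), (l.length - 16 * k + 15) / 16 = j →
      (xormaskLoop l (16 * k) ((124 + 4 * k) % 128)).flatten
        = ((l.drop (16 * k)).zipIdx (16 * k)).map pvF := by
  intro j
  induction j with
  | zero =>
      intro k hk
      have hge : ¬ 16 * k < l.length := by omega
      rw [xormaskLoop.eq_def, dif_neg hge, List.drop_eq_nil_of_le (by omega)]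
      rfl
  | succ j ih =>
      intro k hk
      have hlt : 16 * k < l.length := by omega
      rw [xormaskLoop.eq_def, dif_pos hlt, List.flatten_cons, pvMask_step]
      have hrec : 16 * k + 16 = 16 * (k + 1) := by ring
      rw [hrec, ih (k + 1) (by omega)]
      -- decompose the drop at 16*k into its first ≤16 chars and the rest
      set m := l.drop (16 * k) with hm
      have hsplit : m = m.take 16 ++ m.drop 16 := (List.take_append_drop 16 m).symm
      rw [hsplit, List.zipIdx_append, List.map_append]
      have hmd : m.drop 16 = l.drop (16 * (k + 1)) := by
        rw [hm, List.drop_drop, hrec]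
      -- the tail recursion part
      have htail : (List.zipIdx (m.drop 16) (16 * k + (m.take 16).length)).map pvF
          = (List.zipIdx (l.drop (16 * (k + 1))) (16 * (k + 1))).map pvF := by
        by_cases hlen : 16 ≤ m.length
        · have h16 : (m.take 16).length = 16 := by simp [List.length_take]; omega
          rw [h16, hmd, (by omega : 16 * k + 16 = 16 * (k + 1))]
        · have h1 : m.drop 16 = [] := List.drop_eq_nil_of_le (by omega)
          have h2 : l.drop (16 * (k + 1)) = [] := by rw [← hmd, h1]
          rw [h1, h2]; simp
      -- the current block
      have hhead : l.getD (16 * k) ' ' = l[16 * k] := by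
        simp [List.getD_eq_getElem?_getD, List.getElem?_eq_getElem hlt]
      have hcons : m = l[16 * k] :: l.drop (16 * k + 1) := by
        rw [hm]; exact List.drop_eq_getElem_cons hlt
      have htake : m.take 16 = l[16 * k] :: (l.drop (16 * k + 1)).take 15 := by
        rw [hcons]; rfl
      have hslice : PySem.List.slice l (some ((16 * k + 1 : Nat) : Int))
            (some ((16 * (k + 1) : Nat) : Int)) = (l.drop (16 * k + 1)).take 15 := by
        rw [PySem.List.slice_natCast, (by omega : 16 * (k + 1) - (16 * k + 1) = 15)]
      rw [htail, htake, List.zipIdx_cons, List.map_cons, hslice, hhead]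
      have hmask : pvF (l[16 * k], 16 * k)
          = Char.ofNat (l[16 * k].toNat ^^^ (124 + 4 * k) % 128) := by
        have h16 : (16 * k) % 16 = 0 := by omega
        have hdiv : (16 * k) / 16 = k := by omega
        simp [pvF, pvG, h16, hdiv, Nat.and_two_pow_sub_one_eq_mod (124 + 4 * k) 7]
      rw [hmask, pvMap_zero ((l.drop (16 * k + 1)).take 15) (16 * k + 1)
            (by intro j hj; simp [List.length_take] at hj; omega)]

-- ===== VERDICT (by name: the statement is the Claim_ definition above) =====
theorem xormask_blob_spec : Claim_equal_xormask_blob := by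
  intro data _
  unfold Spec_xormask_blob xormask_blob
  rw [pvAlt_eq]
  have h := pvLoopFlat data.toList ((data.toList.length - 16 * 0 + 15) / 16) 0 rfl
  norm_num at h
  rw [h]
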